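-- pv_equiv track=rewrite | github.com/tenstorrent/tt-buda | pybuda/pybuda/op/eval/common.py | calculate_tile_size
-- ===== SOURCE A (Python) =====
-- def calculate_tile_size(val):
--     # We might not even care about large dim size
--     # that are not divisible by 32
--     if (val > 32):
--         return 32
--
--     smallest_pad = 31
--     current_tile_size = 32
--
--     tile_sizes = [32, 16, 8, 4, 2, 1]
--
--     for tile_size_ in tile_sizes:
--         rem = val % tile_size_
--         pad = tile_size_ - rem
--         if (rem == 0 and smallest_pad != 0):
--             # Pick the largest tile size that divides evenly
--             smallest_pad = 0
--             current_tile_size = tile_size_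
--         elif (pad <= smallest_pad):
--             # pick the tile size with smallest pad
--             smallest_pad = pad
--             current_tile_size = tile_size_
--
--
--     return current_tile_size
-- ===== SOURCE B (Python) =====
-- def calculate_tile_size(val):
--     # Large dims always get the full tile.
--     if val > 32:
--         return 32
--     # First (largest) tile size that divides evenly; 1 always does.
--     for tile_size_ in [32, 16, 8, 4, 2, 1]:
--         if val % tile_size_ == 0:
--             return tile_size_
-- ===== Notes on version B (the rewrite author's own statement) =====
-- stated objective: simpler
-- what changed: Replaces the running smallest_pad/current_tile_size state with an early return of the first (largest) evenly-dividing tile size, dropping the pad computations entirely.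
import Mathlib
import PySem

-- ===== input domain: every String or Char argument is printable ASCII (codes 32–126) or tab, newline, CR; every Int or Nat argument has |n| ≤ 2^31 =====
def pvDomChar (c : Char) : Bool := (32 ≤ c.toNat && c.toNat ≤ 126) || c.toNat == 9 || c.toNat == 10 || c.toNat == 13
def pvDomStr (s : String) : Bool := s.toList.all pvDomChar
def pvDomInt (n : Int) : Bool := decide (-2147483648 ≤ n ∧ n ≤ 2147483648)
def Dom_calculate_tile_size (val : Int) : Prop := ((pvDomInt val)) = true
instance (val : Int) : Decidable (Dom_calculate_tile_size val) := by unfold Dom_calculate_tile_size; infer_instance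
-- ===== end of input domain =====

-- B replaces A's running pad-minimum state with an early return of the first divisor; simpler, same cost.

-- ===== PORT A =====
-- loop body: state = (smallest_pad, current_tile_size)
def calculate_tile_size_step (val : Int) (st : Int × Int) (tile_size_ : Int) : Int × Int :=
  let rem := PySem.Int.mod val tile_size_
  let pad := tile_size_ - rem
  if rem = 0 ∧ st.1 ≠ 0 then (0, tile_size_)
  else if pad ≤ st.1 then (pad, tile_size_)
  else st

def calculate_tile_size (val : Int) : Int :=
  if val > 32 then 32
  else
    (([32, 16, 8, 4, 2, 1] : List Int).foldl (calculate_tile_size_step val) (31, 32)).2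

-- ===== PORT B =====
-- first tile size in the descending list dividing val evenly (the list ends in 1, which always divides)
def calculate_tile_size_find (val : Int) : List Int → Int
  | [] => 1  -- unreachable: the loop always returns at tile size 1
  | t :: ts => if PySem.Int.mod val t = 0 then t else calculate_tile_size_find val ts

def calculate_tile_size_alt (val : Int) : Int :=
  if val > 32 then 32
  else calculate_tile_size_find val [32, 16, 8, 4, 2, 1]

-- ===== PRECONDITION & SPEC =====
def Spec_calculate_tile_size (val : Int) (out : Int) : Prop := out = calculate_tile_size_alt val
instance (val : Int) (out : Int) : Decidable (Spec_calculate_tile_size val out) := by unfold Spec_calculate_tile_size; infer_instance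

-- ===== CLAIM (what is proved, stated in full; the proofs are below) =====
def Claim_equal_calculate_tile_size : Prop := ∀ (val : Int), Dom_calculate_tile_size val → Spec_calculate_tile_size val (calculate_tile_size val)

-- ===== LEMMAS AND PROOFS =====

-- Both programs only look at val through val % t for t ∣ 32, hence only through val % 32.
theorem calc_tile_mod_reduce (val t : Int) (ht : 0 < t) (hd : t ∣ 32) :
    PySem.Int.mod val t = PySem.Int.mod (val % 32) t := by
  rw [PySem.Int.mod_eq_emod_of_pos ht, PySem.Int.mod_eq_emod_of_pos ht,
    Int.emod_emod_of_dvd val hd]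

theorem calc_tile_step_congr (val : Int) (st : Int × Int) (t : Int)
    (ht : t ∈ ([32, 16, 8, 4, 2, 1] : List Int)) :
    calculate_tile_size_step val st t = calculate_tile_size_step (val % 32) st t := by
  unfold calculate_tile_size_step
  fin_cases ht <;>
    rw [calc_tile_mod_reduce val _ (by norm_num) (by norm_num)]

theorem calc_tile_find_congr (val : Int) :
    calculate_tile_size_find val [32, 16, 8, 4, 2, 1]
      = calculate_tile_size_find (val % 32) [32, 16, 8, 4, 2, 1] := by
  simp only [calculate_tile_size_find]
  rw [calc_tile_mod_reduce val 32 (by norm_num) (by norm_num),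
      calc_tile_mod_reduce val 16 (by norm_num) (by norm_num),
      calc_tile_mod_reduce val 8 (by norm_num) (by norm_num),
      calc_tile_mod_reduce val 4 (by norm_num) (by norm_num),
      calc_tile_mod_reduce val 2 (by norm_num) (by norm_num),
      calc_tile_mod_reduce val 1 (by norm_num) (by norm_num)]

theorem calc_tile_core (r : Int) (h0 : 0 ≤ r) (h32 : r < 32) :
    (([32, 16, 8, 4, 2, 1] : List Int).foldl (calculate_tile_size_step r) (31, 32)).2
      = calculate_tile_size_find r [32, 16, 8, 4, 2, 1] := by
  interval_cases r <;> decide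

theorem calc_tile_eq_of_mod (val : Int) (h : ¬ val > 32) :
    calculate_tile_size val = calculate_tile_size_alt val := by
  unfold calculate_tile_size calculate_tile_size_alt
  simp only [h, if_false]
  rw [PySem.List.foldl_congr_mem _ _ _ _
        (fun st t ht => calc_tile_step_congr val st t ht),
      calc_tile_find_congr val]
  exact calc_tile_core (val % 32) (Int.emod_nonneg val (by norm_num))
    (Int.emod_lt_of_pos val (by norm_num))

-- ===== VERDICT (by name: the statement is the Claim_ definition above) =====
theorem calculate_tile_size_spec : Claim_equal_calculate_tile_size := by
  intro val _
  unfold Spec_calculate_tile_size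
  by_cases h : val > 32
  · simp [calculate_tile_size, calculate_tile_size_alt, h]
  · exact calc_tile_eq_of_mod val h
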